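-- pv_equiv track=rewrite | github.com/SergeyBel/science | Sbox-Analyzer/Common/common.py | BooleanFuncToFieldFunc
-- ===== SOURCE A (Python) =====
-- def BinaryStrToValue(str):
-- 	return int(str, 2)
--
-- def BooleanFuncToFieldFunc(equations):
-- 	res = list()
-- 	for i in range(0, len(equations[0])):
-- 		s = ""
-- 		for j in range(0, len(equations)):
-- 			s = s + equations[j][i]
-- 		res.append(BinaryStrToValue(s))
-- 	return res
-- ===== SOURCE B (Python) =====
-- def BooleanFuncToFieldFunc(equations):
--     res = [0] * len(equations[0])
--     for row in equations:
--         res = [res[i] * 2 + int(row[i], 2) for i in range(len(res))]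
--     return res
-- ===== Notes on version B (the rewrite author's own statement) =====
-- stated objective: alternative
-- what changed: B traverses the bit matrix row-major, keeping one running integer accumulator per column (res[i] = res[i]*2 + bit), instead of A's column-major pass that concatenates a per-column string and parses it with int(s, 2); no intermediate strings are built.
-- outside the precondition, e.g. on BooleanFuncToFieldFunc([' 1', '01']): A returns [0, 3], B raises ValueError
import Mathlib
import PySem

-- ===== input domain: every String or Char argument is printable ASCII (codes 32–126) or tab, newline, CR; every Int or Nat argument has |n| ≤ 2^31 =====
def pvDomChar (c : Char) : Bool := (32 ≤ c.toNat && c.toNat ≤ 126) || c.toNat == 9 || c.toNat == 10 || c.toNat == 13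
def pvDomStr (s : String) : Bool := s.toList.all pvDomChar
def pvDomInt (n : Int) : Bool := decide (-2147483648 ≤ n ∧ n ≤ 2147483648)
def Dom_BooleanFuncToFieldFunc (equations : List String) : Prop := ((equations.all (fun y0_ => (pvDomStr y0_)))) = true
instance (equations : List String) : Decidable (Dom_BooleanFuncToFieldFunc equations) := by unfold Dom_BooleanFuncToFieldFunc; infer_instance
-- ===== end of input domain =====

-- B rebuilds the result row-major with one running integer per column (res[i] = res[i]*2 + bit)
-- instead of A's column-major string concatenation + int(s,2); objective: alternative decomposition.

-- ===== PORT A =====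
-- int(s, 2): exact for nonempty strings of '0'/'1' characters (what Pre_ admits)
def BinaryStrToValue (s : List Char) : Int :=
  s.foldl (fun a c => a * 2 + (if c = '1' then 1 else 0)) 0

def BooleanFuncToFieldFunc (equations : List String) : List Int :=
  -- indexing equations[j] / equations[j][i] via pyGetD: in range under Pre_
  (PySem.List.pyRange 0 ((PySem.List.pyGetD equations 0 "").toList.length : Int) 1).foldl
    (fun res i =>
      let s : List Char :=
        (PySem.List.pyRange 0 (equations.length : Int) 1).foldl
          (fun s j => s ++ [PySem.List.pyGetD (PySem.List.pyGetD equations j "").toList i ' ']) []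
      res ++ [BinaryStrToValue s]) []

-- ===== PORT B =====
-- int(c, 2) on a single character: exact for c ∈ {'0','1'} (what Pre_ admits)
def pvBit (c : Char) : Int := if c = '1' then 1 else 0

def BooleanFuncToFieldFunc_alt (equations : List String) : List Int :=
  let init : List Int := List.replicate (PySem.List.pyGetD equations 0 "").toList.length 0
  equations.foldl
    (fun res row =>
      (List.range res.length).map
        (fun i => res.getD i 0 * 2 + pvBit (row.toList.getD i ' ')))
    init

-- ===== PRECONDITION & SPEC =====
-- Pre_ excludes: empty equations and rows shorter than row 0 (A raises IndexError), and inputs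
-- with a non-'0'/'1' character in a used column, where A either raises ValueError or returns a
-- value only through int(s,2)'s lenient stripping of whitespace/underscores/signs, on which B's
-- per-character parsing raises ValueError.
def Pre_BooleanFuncToFieldFunc (equations : List String) : Prop :=
  equations ≠ [] ∧
  ∀ row ∈ equations,
    (equations.headD "").toList.length ≤ row.toList.length ∧
    ∀ i < (equations.headD "").toList.length,
      row.toList.getD i ' ' = '0' ∨ row.toList.getD i ' ' = '1'
instance (equations : List String) : Decidable (Pre_BooleanFuncToFieldFunc equations) := by
  unfold Pre_BooleanFuncToFieldFunc; infer_instance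

def pvWitness_BooleanFuncToFieldFunc : List String := ["10", "01"]

def Spec_BooleanFuncToFieldFunc (equations : List String) (out : List Int) : Prop := out = BooleanFuncToFieldFunc_alt equations
instance (equations : List String) (out : List Int) : Decidable (Spec_BooleanFuncToFieldFunc equations out) := by unfold Spec_BooleanFuncToFieldFunc; infer_instance

-- ===== CLAIM (what is proved, stated in full; the proofs are below) =====
def Claim_equal_BooleanFuncToFieldFunc : Prop := ∀ (equations : List String), Dom_BooleanFuncToFieldFunc equations → Pre_BooleanFuncToFieldFunc equations → Spec_BooleanFuncToFieldFunc equations (BooleanFuncToFieldFunc equations)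

-- ===== LEMMAS AND PROOFS =====

theorem map_range_getD {α : Type} (l : List α) (d : α) :
    (List.range l.length).map (fun j => l.getD j d) = l := by
  apply List.ext_getElem
  · simp
  · intro i h1 h2
    simp [List.getD_eq_getElem?_getD, List.getElem?_eq_getElem h2]

theorem portA_eq_map (equations : List String) :
    BooleanFuncToFieldFunc equations =
      (List.range (PySem.List.pyGetD equations 0 "").toList.length).map
        (fun k => equations.foldl
          (fun a row => a * 2 + pvBit (row.toList.getD k ' ')) 0) := by
  unfold BooleanFuncToFieldFunc
  simp only [PySem.List.foldl_append_singleton_eq_map, List.nil_append,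
    PySem.List.pyRange_zero_nat, List.map_map]
  apply List.map_congr_left
  intro k _
  simp only [Function.comp_def, PySem.List.pyGetD_natCast]
  have h2 : (List.range equations.length).map
      (fun j => (equations.getD j "").toList.getD (k : Nat) ' ')
      = equations.map (fun row => row.toList.getD (k : Nat) ' ') := by
    calc (List.range equations.length).map
          (fun j => (equations.getD j "").toList.getD (k : Nat) ' ')
        = ((List.range equations.length).map (fun j => equations.getD j "")).map
            (fun row => row.toList.getD (k : Nat) ' ') := by rw [List.map_map]; rfl
      _ = _ := by rw [map_range_getD]
  rw [h2]
  unfold BinaryStrToValue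
  rw [List.foldl_map]
  simp [pvBit]

theorem portB_fold (rows : List String) (w : Nat) (v : Nat → Int) :
    rows.foldl
      (fun res row =>
        (List.range res.length).map
          (fun i => res.getD i 0 * 2 + pvBit (row.toList.getD i ' ')))
      ((List.range w).map v)
    = (List.range w).map
        (fun k => rows.foldl (fun a row => a * 2 + pvBit (row.toList.getD k ' ')) (v k)) := by
  induction rows generalizing v with
  | nil => simp
  | cons r rs ih =>
    simp only [List.foldl_cons]
    have hstep : (List.range ((List.range w).map v).length).map
        (fun i => ((List.range w).map v).getD i 0 * 2 + pvBit (r.toList.getD i ' '))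
        = (List.range w).map (fun k => v k * 2 + pvBit (r.toList.getD k ' ')) := by
      rw [List.length_map, List.length_range]
      apply List.map_congr_left
      intro i hi
      rw [List.mem_range] at hi
      rw [List.getD_eq_getElem?_getD, List.getElem?_map, List.getElem?_range hi]
      simp
    rw [hstep, ih]

theorem portB_eq_map (equations : List String) :
    BooleanFuncToFieldFunc_alt equations =
      (List.range (PySem.List.pyGetD equations 0 "").toList.length).map
        (fun k => equations.foldl
          (fun a row => a * 2 + pvBit (row.toList.getD k ' ')) 0) := by
  unfold BooleanFuncToFieldFunc_alt
  have hrep : List.replicate (PySem.List.pyGetD equations 0 "").toList.length (0 : Int)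
      = (List.range (PySem.List.pyGetD equations 0 "").toList.length).map (fun _ => 0) := by
    rw [List.map_const', List.length_range]
  rw [hrep, portB_fold]

-- ===== VERDICT (by name: the statement is the Claim_ definition above) =====
theorem BooleanFuncToFieldFunc_spec : Claim_equal_BooleanFuncToFieldFunc := by
  intro equations _ _
  unfold Spec_BooleanFuncToFieldFunc
  rw [portA_eq_map, portB_eq_map]
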